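-- pv_equiv track=rewrite | github.com/nemethbalaazs/SOE_Prog1_PY | 2025/prog1-25t-hf04-schneweisz/hf2_allergenek.py | collect_allergenes
-- ===== SOURCE A (Python) =====
-- allergenek = ["glutén", "tej", "mogyoró", "tojás", "hal", "rákfélék", "szója"]
--
-- def collect_allergenes(menu: dict[str, list[int]]) -> dict[str, list[str]]:
--     """Összegyűjti, hogy mely allergének mely ételekben szerepelnek.
--
--     Kap egy dictet, melyben a kulcsok az ételek nevei, az értékek pedig a benne található allergének indexeinek listái.
--     Az indexek a fenti `allergenek` listának megfelelően vannak megadva.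
--
--     Visszaad egy dictet, melyben a kulcsok az allergének nevei, az értékek pedig az ételek listái, melyekben előfordulnak.
--     Csak olyan allergének szerepeljenek a visszaadott dictben, melyek valamilyen ételben előfordulnak!
--
--     >>> collect_allergenes({"tészta": [0, 3], "krumplipüré": [0, 1, 3], "halászlé": [4, 5], "húsleves": []}) \
--         == {'glutén': ['tészta', 'krumplipüré'], 'tej': ['krumplipüré'], 'tojás': ['tészta', 'krumplipüré'], 'hal': ['halászlé'], 'rákfélék': ['halászlé']}
--     True
--     """
--     allergenes = {}
--     for key, value in menu.items():
--         for item in value: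
--             if allergenek[item] not in allergenes:
--                 allergenes[allergenek[item]] = []
--                 allergenes[allergenek[item]].append(key)
--             else:
--                 allergenes[allergenek[item]].append(key)
--     return allergenes
-- ===== SOURCE B (Python) =====
-- allergenek = ["glutén", "tej", "mogyoró", "tojás", "hal", "rákfélék", "szója"]
--
-- def collect_allergenes(menu: dict[str, list[int]]) -> dict[str, list[str]]:
--     pairs = [(allergenek[i], food) for food, idxs in menu.items() for i in idxs]
--     order = list(dict.fromkeys(name for name, _ in pairs))
--     return {name: [food for n, food in pairs if n == name] for name in order}
-- ===== Notes on version B (the rewrite author's own statement) =====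
-- stated objective: alternative
-- what changed: Replaces the fused inversion loop that grows a dict incrementally by a map phase producing (allergen, food) pairs, an ordered dedup of the allergen names, and a per-name filter pass building the result dict in one comprehension.
import Mathlib
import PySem

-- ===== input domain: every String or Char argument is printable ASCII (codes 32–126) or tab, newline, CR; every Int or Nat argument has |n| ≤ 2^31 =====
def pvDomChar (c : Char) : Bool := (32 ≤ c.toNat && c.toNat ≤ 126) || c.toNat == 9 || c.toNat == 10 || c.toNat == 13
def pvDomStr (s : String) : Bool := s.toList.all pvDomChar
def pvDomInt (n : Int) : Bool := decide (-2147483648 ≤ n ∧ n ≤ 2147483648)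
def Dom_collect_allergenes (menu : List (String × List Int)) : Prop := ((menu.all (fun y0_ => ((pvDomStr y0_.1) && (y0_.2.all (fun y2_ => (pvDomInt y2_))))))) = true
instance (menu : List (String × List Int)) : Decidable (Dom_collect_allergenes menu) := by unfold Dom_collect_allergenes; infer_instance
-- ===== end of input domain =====

-- B replaces the fused dict-growing inversion loop by a pairs map phase + ordered dedup + per-name filter; objective: alternative (no speed claim).

def allergenekPV : List String := ["glutén", "tej", "mogyoró", "tojás", "hal", "rákfélék", "szója"]

-- ===== PORT A =====
-- nested loops over menu items and index lists, growing a dict: absent key → insert [] then append, present key → append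
def collect_allergenes (menu : List (String × List Int)) : List (String × List String) :=
  (menu.foldl (fun allergenes kv =>
    kv.2.foldl (fun allergenes item =>
      let name := PySem.List.pyGetD allergenekPV item ""
      if allergenes.contains name = false then
        ((allergenes.insert name []).modify name [] (fun l => l ++ [kv.1]))
      else
        allergenes.modify name [] (fun l => l ++ [kv.1])) allergenes)
    PySem.Dict.empty).items

-- ===== PORT B =====
-- map phase to (allergen, food) pairs, ordered dedup of names, per-name filter pass
def collect_allergenes_alt (menu : List (String × List Int)) : List (String × List String) :=
  let pairs := menu.flatMap (fun kv => kv.2.map (fun i => (PySem.List.pyGetD allergenekPV i "", kv.1)))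
  let order := PySem.List.dedup (pairs.map (·.1))
  order.map (fun name => (name, (pairs.filter (fun p => p.1 == name)).map (·.2)))

-- ===== PRECONDITION & SPEC =====
-- Pre_ excludes exactly the inputs on which A raises IndexError: an allergen index outside [-7, 7) (allergenek has 7 entries).
def Pre_collect_allergenes (menu : List (String × List Int)) : Prop :=
  (menu.all (fun kv => kv.2.all (fun i => decide (-7 ≤ i ∧ i < 7)))) = true
instance (menu : List (String × List Int)) : Decidable (Pre_collect_allergenes menu) := by unfold Pre_collect_allergenes; infer_instance
def pvWitness_collect_allergenes : (List (String × List Int)) := [("pasta", [0, 3]), ("soup", [4, -2])]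
def Spec_collect_allergenes (menu : List (String × List Int)) (out : List (String × List String)) : Prop := out = collect_allergenes_alt menu
instance (menu : List (String × List Int)) (out : List (String × List String)) : Decidable (Spec_collect_allergenes menu out) := by unfold Spec_collect_allergenes; infer_instance

-- ===== CLAIM (what is proved, stated in full; the proofs are below) =====
def Claim_equal_collect_allergenes : Prop := ∀ (menu : List (String × List Int)), Dom_collect_allergenes menu → Pre_collect_allergenes menu → Spec_collect_allergenes menu (collect_allergenes menu)

-- ===== LEMMAS AND PROOFS =====

-- A's step with both branches collapses to a single modify
lemma step_collapse (d : PySem.Dict String (List String)) (name key : String) :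
    (if d.contains name = false then
      ((d.insert name []).modify name [] (fun l => l ++ [key]))
    else d.modify name [] (fun l => l ++ [key]))
    = d.modify name [] (fun l => l ++ [key]) := by
  by_cases h : d.contains name = false
  · simp only [h, if_true]
    simp [PySem.Dict.modify, PySem.Dict.getD_insert_self, PySem.Dict.insert_insert_self,
      PySem.Dict.getD_of_not_contains, h]
  · simp [h]

lemma foldl_flatMap_eq {α β γ : Type} (l : List α) (f : α → List β) (g : γ → β → γ) (init : γ) :
    (l.flatMap f).foldl g init = l.foldl (fun acc a => (f a).foldl g acc) init := by
  induction l generalizing init with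
  | nil => rfl
  | cons x xs ih => simp [List.flatMap_cons, List.foldl_append, ih]

-- A's nested fold equals a single grouping fold over the materialized pairs
lemma foldA_eq (menu : List (String × List Int)) :
    (menu.foldl (fun allergenes kv =>
      kv.2.foldl (fun allergenes item =>
        let name := PySem.List.pyGetD allergenekPV item ""
        if allergenes.contains name = false then
          ((allergenes.insert name []).modify name [] (fun l => l ++ [kv.1]))
        else
          allergenes.modify name [] (fun l => l ++ [kv.1])) allergenes)
      PySem.Dict.empty)
    = ((menu.flatMap (fun kv => kv.2.map (fun i => (PySem.List.pyGetD allergenekPV i "", kv.1)))).foldl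
        (fun d p => d.modify p.1 [] (fun l => l ++ [p.2])) PySem.Dict.empty) := by
  rw [foldl_flatMap_eq]
  apply List.foldl_ext
  intro acc kv _
  rw [List.foldl_map]
  apply List.foldl_ext
  intro d i _
  exact step_collapse d (PySem.List.pyGetD allergenekPV i "") kv.1

-- ===== VERDICT (by name: the statement is the Claim_ definition above) =====
theorem collect_allergenes_spec : Claim_equal_collect_allergenes := by
  intro menu _ _
  unfold Spec_collect_allergenes collect_allergenes collect_allergenes_alt
  rw [foldA_eq]
  set pairs := menu.flatMap (fun kv => kv.2.map (fun i => (PySem.List.pyGetD allergenekPV i "", kv.1))) with hp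
  have hnd : ((pairs.foldl (fun d p => d.modify p.1 [] (fun l => l ++ [p.2])) PySem.Dict.empty)).keys.Nodup := by
    exact PySem.Dict.nodup_keys_foldl_modify_key pairs (·.1) [] _ _ PySem.Dict.nodup_keys_empty
  rw [PySem.Dict.items_eq_map_keys _ hnd []]
  rw [PySem.Dict.keys_foldl_modify_key]
  simp only [PySem.Dict.keys_empty, PySem.Set.update_nil_left, PySem.List.dedup_eq_ofList]
  apply List.map_congr_left
  intro name _
  congr 1
  rw [PySem.Dict.getD_foldl_modify_append, PySem.Dict.getD_empty]
  simp
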